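-- pv_equiv track=rewrite | github.com/Jurassic-Knights/jurassic-knights-valley | tools/sync_weapon_types.py | detect_weapon_from_description
-- ===== SOURCE A (Python) =====
-- weapon_keywords = {
--     'greatsword': 'greatsword',
--     'sword': 'sword',
--     'axe': 'axe',
--     'mace': 'mace',
--     'lance': 'lance',
--     'halberd': 'halberd',
--     'billhook': 'billhook',
--     'trench club': 'trench_club',
--     'bayonet': 'bayonet',
--     'spear': 'spear',
--     'pike': 'pike',
--     'glaive': 'glaive',
--     'warhammer': 'warhammer',
--     'flail': 'flail',
--     'rifle': 'rifle',
--     'pistol': 'pistol',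
--     'submachine gun': 'submachine_gun',
--     'machine gun': 'machine_gun',
--     'rifle': 'rifle',
--     'war horn': 'war_horn',
-- }
--
-- def detect_weapon_from_description(desc):
--     """Detect weapon type from sourceDescription."""
--     if not desc:
--         return None
--     desc_lower = desc.lower()
--
--     # Check longer phrases first to avoid partial matches
--     for keyword, weapon_type in sorted(weapon_keywords.items(), key=lambda x: -len(x[0])):
--         if keyword in desc_lower:
--             return weapon_type
--     return None
-- ===== SOURCE B (Python) =====
-- weapon_keywords = {
--     'greatsword': 'greatsword',
--     'sword': 'sword',
--     'axe': 'axe',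
--     'mace': 'mace',
--     'lance': 'lance',
--     'halberd': 'halberd',
--     'billhook': 'billhook',
--     'trench club': 'trench_club',
--     'bayonet': 'bayonet',
--     'spear': 'spear',
--     'pike': 'pike',
--     'glaive': 'glaive',
--     'warhammer': 'warhammer',
--     'flail': 'flail',
--     'rifle': 'rifle',
--     'pistol': 'pistol',
--     'submachine gun': 'submachine_gun',
--     'machine gun': 'machine_gun',
--     'rifle': 'rifle',
--     'war horn': 'war_horn',
-- }
--
-- def detect_weapon_from_description(desc):
--     """Detect weapon type from sourceDescription."""
--     if not desc:
--         return None
--     desc_lower = desc.lower()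
--     # Single tracking scan: keep the longest matching keyword seen so far;
--     # strict '>' keeps the earliest among equal-length matches.
--     best_keyword = ''
--     best_type = None
--     for keyword, weapon_type in weapon_keywords.items():
--         if keyword in desc_lower and len(keyword) > len(best_keyword):
--             best_keyword, best_type = keyword, weapon_type
--     return best_type
-- ===== Notes on version B (the rewrite author's own statement) =====
-- stated objective: simpler
-- what changed: Replaces A's sort-the-keyword-table-by-descending-length-then-return-first-substring-match with a single unsorted tracking scan that keeps the longest matching keyword seen so far (strict '>' preserves the earliest-among-equal-length tie-break).
import Mathlib
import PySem

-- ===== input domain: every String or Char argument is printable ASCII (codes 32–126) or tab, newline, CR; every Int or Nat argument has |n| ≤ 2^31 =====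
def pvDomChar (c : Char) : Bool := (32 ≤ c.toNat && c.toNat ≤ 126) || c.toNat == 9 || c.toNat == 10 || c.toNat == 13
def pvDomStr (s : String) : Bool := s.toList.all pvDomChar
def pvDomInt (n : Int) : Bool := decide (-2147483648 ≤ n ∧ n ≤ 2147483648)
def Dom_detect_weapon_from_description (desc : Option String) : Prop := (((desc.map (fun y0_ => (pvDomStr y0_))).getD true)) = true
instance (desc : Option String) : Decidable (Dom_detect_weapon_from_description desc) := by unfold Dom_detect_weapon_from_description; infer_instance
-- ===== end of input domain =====

-- B replaces A's sort-then-first-match by a single tracking scan over the keyword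
-- table that keeps the longest matching keyword seen so far (simpler: no sort).


-- ===== PORT A =====
-- weapon_keywords as an association list in dict insertion order (the duplicate
-- 'rifle' entry overwrites in place, so it appears once, at its first position).
def pvWeaponKeywords : List (String × String) := [
  ("greatsword", "greatsword"), ("sword", "sword"), ("axe", "axe"), ("mace", "mace"),
  ("lance", "lance"), ("halberd", "halberd"), ("billhook", "billhook"),
  ("trench club", "trench_club"), ("bayonet", "bayonet"), ("spear", "spear"),
  ("pike", "pike"), ("glaive", "glaive"), ("warhammer", "warhammer"), ("flail", "flail"),
  ("rifle", "rifle"), ("pistol", "pistol"), ("submachine gun", "submachine_gun"),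
  ("machine gun", "machine_gun"), ("war horn", "war_horn")]

-- the sort key lambda x: -len(x[0])
def pvNegLen (x : String × String) : Int := -(PySem.Str.len x.1)

-- A's for-loop: return the first keyword (in the given order) contained in desc_lower
def pvFirstMatch : List (String × String) → String → Option String
  | [], _ => none
  | (k, t) :: rest, dl => if PySem.Str.isIn k dl then some t else pvFirstMatch rest dl

def detect_weapon_from_description (desc : Option String) : Option String :=
  match desc with
  | none => none
  | some s =>
    if s = "" then none
    else
      pvFirstMatch (PySem.List.sorted pvWeaponKeywords pvNegLen false) (PySem.Str.lower s)

-- ===== PORT B =====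
-- B's loop body: replace the best match only by a strictly longer matching keyword
def pvBestStep (dl : String) (best : String × Option String) (kw : String × String) :
    String × Option String :=
  if PySem.Str.isIn kw.1 dl && decide (PySem.Str.len best.1 < PySem.Str.len kw.1)
  then (kw.1, some kw.2) else best

def detect_weapon_from_description_alt (desc : Option String) : Option String :=
  match desc with
  | none => none
  | some s =>
    if s = "" then none
    else (pvWeaponKeywords.foldl (pvBestStep (PySem.Str.lower s)) ("", none)).2

-- ===== PRECONDITION & SPEC =====
def Spec_detect_weapon_from_description (desc : Option String) (out : Option String) : Prop := out = detect_weapon_from_description_alt desc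
instance (desc : Option String) (out : Option String) : Decidable (Spec_detect_weapon_from_description desc out) := by unfold Spec_detect_weapon_from_description; infer_instance

-- ===== CLAIM (what is proved, stated in full; the proofs are below) =====
def Claim_equal_detect_weapon_from_description : Prop := ∀ (desc : Option String), Dom_detect_weapon_from_description desc → Spec_detect_weapon_from_description desc (detect_weapon_from_description desc)

-- ===== LEMMAS AND PROOFS =====

-- A's loop is find? followed by taking the value component
theorem pvFirstMatch_eq_find? (l : List (String × String)) (dl : String) :
    pvFirstMatch l dl = (l.find? (fun x => PySem.Str.isIn x.1 dl)).map Prod.snd := by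
  induction l with
  | nil => rfl
  | cons x t ih =>
    obtain ⟨k, v⟩ := x
    cases h : PySem.Chars.isIn k.toList dl.toList <;>
      simp [pvFirstMatch, h, ih]

-- inserting x into a key-ascending list: the first match is x exactly when x matches
-- and is strictly smaller in key than the old first match (or there was none)
theorem pv_find?_insertBy (q : String × String → Bool) (x : String × String)
    (ys : List (String × String)) (h : ys.Pairwise (fun a b => pvNegLen a ≤ pvNegLen b)) :
    (PySem.List.insertBy (fun a b => decide (pvNegLen a < pvNegLen b)) x ys).find? q =
      match ys.find? q with
      | none => if q x then some x else none
      | some m => if q x && decide (pvNegLen x < pvNegLen m) then some x else some m := by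
  induction ys with
  | nil =>
    by_cases hx : q x <;> simp [PySem.List.insertBy, List.find?, hx]
  | cons y t ih =>
    have hy : ∀ z ∈ t, pvNegLen y ≤ pvNegLen z := (List.pairwise_cons.mp h).1
    have ht := (List.pairwise_cons.mp h).2
    by_cases c1 : pvNegLen x < pvNegLen y
    · have hins : PySem.List.insertBy (fun a b => decide (pvNegLen a < pvNegLen b)) x (y :: t)
          = x :: y :: t := by simp [PySem.List.insertBy, c1]
      rw [hins]
      cases hf : (y :: t).find? q with
      | none =>
        by_cases hx : q x <;> simp [hx, hf]
      | some m =>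
        have hm : m = y ∨ m ∈ t := by
          have := List.mem_of_find?_eq_some hf
          simpa using this
        have hym : pvNegLen y ≤ pvNegLen m := by
          rcases hm with rfl | hm
          · exact le_rfl
          · exact hy m hm
        have hxm : pvNegLen x < pvNegLen m := lt_of_lt_of_le c1 hym
        by_cases hx : q x <;> simp [hx, hf, hxm]
    · have hins : PySem.List.insertBy (fun a b => decide (pvNegLen a < pvNegLen b)) x (y :: t)
          = y :: PySem.List.insertBy (fun a b => decide (pvNegLen a < pvNegLen b)) x t := by
        simp [PySem.List.insertBy, c1]
      rw [hins]
      by_cases hqy : q y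
      · simp [hqy, c1]
      · simp only [List.find?_cons, hqy]
        exact ih ht

-- B's tracking scan computes the first match of the sorted list, paired with its keyword
theorem pv_foldl_best_eq (dl : String) (l : List (String × String))
    (hx : ∀ x ∈ l, 0 < PySem.Str.len x.1) :
    l.foldl (pvBestStep dl) ("", none) =
      match (PySem.List.sorted l pvNegLen false).find? (fun x => PySem.Str.isIn x.1 dl) with
      | none => ("", none)
      | some m => (m.1, some m.2) := by
  induction l using List.reverseRecOn with
  | nil => rfl
  | append_singleton l x ih =>
    have hxl : ∀ z ∈ l, 0 < PySem.Str.len z.1 := fun z hz => hx z (List.mem_append_left _ hz)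
    have hxx : 0 < PySem.Str.len x.1 := hx x (List.mem_append_right _ (List.mem_singleton_self x))
    have hsorted : PySem.List.sorted (l ++ [x]) pvNegLen false
        = PySem.List.insertBy (fun a b => decide (pvNegLen a < pvNegLen b)) x
            (PySem.List.sorted l pvNegLen false) := by
      rw [PySem.List.sorted_eq_foldl_insertBy, List.foldl_append,
        ← PySem.List.sorted_eq_foldl_insertBy]
      rfl
    rw [List.foldl_append, ih hxl, hsorted,
      pv_find?_insertBy _ _ _ (PySem.List.sorted_pairwise l pvNegLen)]
    have hxx' : 0 < x.1.length := by simpa [PySem.Str.len_eq] using hxx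
    cases hf : (PySem.List.sorted l pvNegLen false).find? (fun z => PySem.Str.isIn z.1 dl) with
    | none =>
      cases hq : PySem.Chars.isIn x.1.toList dl.toList <;>
        simp [pvBestStep, hq, hxx']
    | some m =>
      have hiff : pvNegLen x < pvNegLen m ↔ m.1.length < x.1.length := by
        simp [pvNegLen, PySem.Str.len_eq]
      cases hq : PySem.Chars.isIn x.1.toList dl.toList <;>
        by_cases hlt : m.1.length < x.1.length <;>
          simp [pvBestStep, hq, hlt, hiff]

-- ===== VERDICT (by name: the statement is the Claim_ definition above) =====
theorem detect_weapon_from_description_spec : Claim_equal_detect_weapon_from_description := by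
  unfold Claim_equal_detect_weapon_from_description
  intro desc _
  unfold Spec_detect_weapon_from_description
  cases desc with
  | none => rfl
  | some s =>
    by_cases hs : s = ""
    · simp [detect_weapon_from_description, detect_weapon_from_description_alt, hs]
    · have hx : ∀ x ∈ pvWeaponKeywords, 0 < PySem.Str.len x.1 := by decide
      simp only [detect_weapon_from_description, detect_weapon_from_description_alt, hs]
      rw [pvFirstMatch_eq_find?, pv_foldl_best_eq (PySem.Str.lower s) pvWeaponKeywords hx]
      cases hf : (PySem.List.sorted pvWeaponKeywords pvNegLen false).find?
          (fun x => PySem.Str.isIn x.1 (PySem.Str.lower s)) <;> simp
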